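-- pv_equiv track=rewrite | github.com/BenMaltby/DuolingoBot | main.py | calcBestPhrase
-- ===== SOURCE A (Python) =====
-- def searchRank(search, actual):
-- 	# sometimes the bot reads it really badly and this
-- 	# is a stupid simple ranking algorithm
-- 	# I wouldn't even worry about it
-- 	rank = 0
-- 	for i, j in enumerate(actual):
-- 		for b in range(-4, 5, 1):
-- 			buff = i + b
-- 			if 0 <= buff < len(search):
-- 				if search[buff] == j:
-- 					rank += 5 - abs(i - buff)
-- 	return rank
--
-- def calcBestPhrase(text, wList):
-- 	# again ranking algorithm that ranks what it's
-- 	# read to every possible question and goes with the best result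
-- 	best_phrase, best_rank = "", 0
-- 	for _, phrase in enumerate(wList):
-- 		new_rank = searchRank(text, phrase)
-- 		if new_rank > best_rank:
-- 			best_rank = new_rank
-- 			best_phrase = phrase
-- 	return best_phrase
-- ===== SOURCE B (Python) =====
-- def calcBestPhrase(text, wList):
-- 	# Precompute a weight table: (char c, phrase position i) -> total score that
-- 	# text contributes when c sits at position i (a 9-wide convolution of text).
-- 	# Scoring a phrase is then one O(1) lookup per character.
-- 	weight = {}
-- 	for p, c in enumerate(text):
-- 		for d in range(-4, 5):
-- 			key = (c, p + d)
-- 			weight[key] = weight.get(key, 0) + (5 - abs(d))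
-- 	best_phrase, best_rank = "", 0
-- 	for phrase in wList:
-- 		rank = 0
-- 		for i, ch in enumerate(phrase):
-- 			rank += weight.get((ch, i), 0)
-- 		if rank > best_rank:
-- 			best_rank = rank
-- 			best_phrase = phrase
-- 	return best_phrase
-- ===== Notes on version B (the rewrite author's own statement) =====
-- stated objective: alternative
-- what changed: B precomputes one dict mapping (char, position) to the total window weight text contributes there (a 9-wide convolution of text, built once), and scores each phrase character with a single dict lookup, instead of A's per-character +/-4 window probe into text.
import Mathlib
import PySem

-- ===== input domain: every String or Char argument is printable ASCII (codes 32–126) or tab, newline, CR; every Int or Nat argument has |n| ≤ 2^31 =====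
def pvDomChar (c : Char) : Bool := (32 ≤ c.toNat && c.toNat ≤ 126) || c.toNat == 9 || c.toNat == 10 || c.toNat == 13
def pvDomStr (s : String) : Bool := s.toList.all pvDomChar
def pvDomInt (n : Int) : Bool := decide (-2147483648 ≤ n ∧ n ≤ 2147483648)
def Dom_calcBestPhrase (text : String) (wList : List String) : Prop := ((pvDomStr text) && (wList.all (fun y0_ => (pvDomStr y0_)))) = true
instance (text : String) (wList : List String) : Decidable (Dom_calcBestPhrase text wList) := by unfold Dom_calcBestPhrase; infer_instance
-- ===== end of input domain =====

-- B precomputes a (char, position) → weight table from `text` once and scores each phrase char with a single lookup, instead of A's fixed ±4 window probe into `text` per phrase character (alternative algorithm; same value everywhere).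

-- ===== PORT A =====
def searchRank (search : String) (actual : String) : Int :=
  (PySem.List.enumerate actual.toList 0).foldl (fun rank ij =>
    (PySem.List.pyRange (-4) 5 1).foldl (fun rank b =>
      if 0 ≤ ij.1 + b ∧ ij.1 + b < (search.toList.length : Int) then
        if PySem.List.pyGetD search.toList (ij.1 + b) ' ' = ij.2 then
          rank + (5 - |ij.1 - (ij.1 + b)|)
        else rank
      else rank) rank) 0

def calcBestPhrase (text : String) (wList : List String) : String :=
  ((PySem.List.enumerate wList 0).foldl (fun st p =>
      let newRank := searchRank text p.2
      if newRank > st.2 then (p.2, newRank) else st)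
    (("" : String), (0 : Int))).1

-- ===== PORT B =====
-- weight = {}; for p, c in enumerate(text):
--   for d in range(-4, 5): weight[(c, p+d)] = weight.get((c, p+d), 0) + (5 - abs(d))
def pvBuildWeight (text : String) : PySem.Dict (Char × Int) Int :=
  (PySem.List.enumerate text.toList 0).foldl (fun w pc =>
    (PySem.List.pyRange (-4) 5 1).foldl (fun w d =>
      w.modify (pc.2, pc.1 + d) 0 (· + (5 - |d|))) w) PySem.Dict.empty

def calcBestPhrase_alt (text : String) (wList : List String) : String :=
  let weight := pvBuildWeight text
  (wList.foldl (fun st phrase =>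
      let rank := (PySem.List.enumerate phrase.toList 0).foldl
        (fun rank ich => rank + weight.getD (ich.2, ich.1) 0) 0
      if rank > st.2 then (phrase, rank) else st)
    (("" : String), (0 : Int))).1

-- ===== PRECONDITION & SPEC =====
def Spec_calcBestPhrase (text : String) (wList : List String) (out : String) : Prop := out = calcBestPhrase_alt text wList
instance (text : String) (wList : List String) (out : String) : Decidable (Spec_calcBestPhrase text wList out) := by unfold Spec_calcBestPhrase; infer_instance

-- ===== CLAIM (what is proved, stated in full; the proofs are below) =====
def Claim_equal_calcBestPhrase : Prop := ∀ (text : String) (wList : List String), Dom_calcBestPhrase text wList → Spec_calcBestPhrase text wList (calcBestPhrase text wList)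

-- ===== LEMMAS AND PROOFS =====

-- weight contributed by position p of `s` when matched against char j sitting at position i
def pvH (s : List Char) (i : Int) (j : Char) (p : Int) : Int :=
  if 0 ≤ p ∧ p < (s.length : Int) ∧ PySem.List.pyGetD s p ' ' = j ∧ p - i ≤ 4 ∧ i - p ≤ 4
  then 5 - |i - p| else 0

-- per-offset summand of A's inner window loop
def pvGA (s : List Char) (i : Int) (j : Char) (b : Int) : Int :=
  if 0 ≤ i + b ∧ i + b < (s.length : Int) ∧ PySem.List.pyGetD s (i + b) ' ' = j
  then 5 - |i - (i + b)| else 0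

lemma pvH_zero_window (s : List Char) (i : Int) (j : Char) (p : Int)
    (h : ¬(p - i ≤ 4 ∧ i - p ≤ 4)) : pvH s i j p = 0 := by
  unfold pvH; rw [if_neg]; rintro ⟨_, _, _, h4, h5⟩; exact h ⟨h4, h5⟩

lemma pvH_zero_range (s : List Char) (i : Int) (j : Char) (p : Int)
    (h : ¬(0 ≤ p ∧ p < (s.length : Int))) : pvH s i j p = 0 := by
  unfold pvH; rw [if_neg]; rintro ⟨h1, h2, _⟩; exact h ⟨h1, h2⟩

-- a fold of weighted `modify`-increments reads back as an indicator sum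
lemma pv_getD_foldl_modify_addw {κ β : Type} [BEq κ] [LawfulBEq κ] [DecidableEq κ]
    (l : List β) (key : β → κ) (wt : β → Int) (k : κ) :
    ∀ d : PySem.Dict κ Int,
    (l.foldl (fun d x => d.modify (key x) 0 (· + wt x)) d).getD k 0
      = d.getD k 0 + (l.map (fun x => if key x = k then wt x else 0)).sum := by
  induction l with
  | nil => intro d; simp
  | cons x xs ih =>
      intro d
      simp only [List.foldl_cons, List.map_cons, List.sum_cons, ih]
      rw [PySem.Dict.getD_modify]
      by_cases h : k = key x
      · subst h
        rw [if_pos rfl, if_pos rfl]; ring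
      · rw [if_neg h, if_neg (fun hc => h hc.symm)]; ring

-- summing an equality indicator over a duplicate-free list picks the single hit
lemma pv_sum_indicator (ds : List Int) (hnd : ds.Nodup) (k i : Int) (wt : Int → Int) :
    (ds.map (fun d => if k + d = i then wt d else 0)).sum
      = if i - k ∈ ds then wt (i - k) else 0 := by
  induction ds with
  | nil => simp
  | cons d ds ih =>
      rcases List.nodup_cons.mp hnd with ⟨hnotin, hnd'⟩
      simp only [List.map_cons, List.sum_cons, ih hnd', List.mem_cons]
      by_cases h : k + d = i
      · have hd : i - k = d := by omega
        rw [if_pos h, if_neg (by rw [hd]; exact hnotin), if_pos (Or.inl hd), hd]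
        ring
      · rw [if_neg h]
        by_cases h2 : i - k ∈ ds
        · rw [if_pos h2, if_pos (Or.inr h2)]; ring
        · rw [if_neg h2, if_neg (fun hc => by
            rcases hc with h3 | h3
            · exact h (by omega)
            · exact h2 h3)]
          ring

-- A's window summands over [-4..4] are the pvH weights over the shifted window [i-4..i+4]
lemma pv_mapA (s : List Char) (i : Int) (j : Char) :
    (PySem.List.pyRange (-4) 5 1).map (pvGA s i j)
      = (PySem.List.pyRange (i - 4) (i + 5) 1).map (pvH s i j) := by
  rw [PySem.List.pyRange_one, PySem.List.pyRange_one]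
  have h9 : ((5 : Int) - (-4)).toNat = 9 := by decide
  have h9' : ((i + 5) - (i - 4)).toNat = 9 := by omega
  rw [h9, h9', List.map_map, List.map_map]
  refine List.map_congr_left (fun k hk => ?_)
  have hk9 : k < 9 := List.mem_range.mp hk
  simp only [Function.comp_apply]
  have e : i + (-4 + (k : Int)) = i - 4 + (k : Int) := by ring
  unfold pvGA pvH
  rw [e]
  split_ifs with h1 h2 h2
  · rfl
  · exact absurd ⟨h1.1, h1.2.1, h1.2.2, by omega, by omega⟩ h2
  · exact absurd ⟨h2.1, h2.2.1, h2.2.2.1⟩ h1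
  · rfl

lemma pv_toFinset_window (i : Int) :
    (PySem.List.pyRange (i - 4) (i + 5) 1).toFinset = Finset.Icc (i - 4) (i + 4) := by
  ext x
  simp [List.mem_toFinset, PySem.List.mem_pyRange_one, Finset.mem_Icc]
  omega

lemma pv_toFinset_range (n : Int) :
    (PySem.List.pyRange 0 n 1).toFinset = Finset.Ico 0 n := by
  ext x
  simp [List.mem_toFinset, PySem.List.mem_pyRange_one, Finset.mem_Ico]

-- A's window sum over [-4..4] equals the pvH sum over ALL positions of s
lemma pv_window_eq_range (s : List Char) (i : Int) (j : Char) :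
    ((PySem.List.pyRange (-4) 5 1).map (pvGA s i j)).sum
      = ((PySem.List.pyRange 0 (s.length : Int) 1).map (pvH s i j)).sum := by
  rw [pv_mapA,
      ← List.sum_toFinset _ (PySem.List.nodup_pyRange_one _ _),
      ← List.sum_toFinset _ (PySem.List.nodup_pyRange_one _ _),
      pv_toFinset_window, pv_toFinset_range]
  have hsub1 := Finset.sum_subset
    (Finset.inter_subset_right (s₁ := Finset.Ico (0:Int) (s.length : Int)) (s₂ := Finset.Icc (i-4) (i+4)))
    (f := pvH s i j) (by
      intro x hx hnx
      apply pvH_zero_range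
      simp only [Finset.mem_inter, Finset.mem_Ico, Finset.mem_Icc] at hx hnx
      intro hc; exact hnx ⟨⟨hc.1, hc.2⟩, hx⟩)
  have hsub2 := Finset.sum_subset
    (Finset.inter_subset_left (s₁ := Finset.Ico (0:Int) (s.length : Int)) (s₂ := Finset.Icc (i-4) (i+4)))
    (f := pvH s i j) (by
      intro x hx hnx
      apply pvH_zero_window
      simp only [Finset.mem_inter, Finset.mem_Ico, Finset.mem_Icc] at hx hnx
      intro hc; exact hnx ⟨hx, by omega⟩)
  rw [← hsub1, hsub2]

-- reading the weight table back: one entry is exactly A's window sum for that (char, position)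
lemma pv_weight_getD (text : String) (i : Int) (j : Char) :
    (pvBuildWeight text).getD (j, i) 0
      = ((PySem.List.pyRange (-4) 5 1).map (pvGA text.toList i j)).sum := by
  set s := text.toList with hs
  -- unroll the nested build loop into a sum of per-(p, c) indicator sums
  have hbuild : ∀ (l : List (Int × Char)) (w : PySem.Dict (Char × Int) Int),
      (l.foldl (fun w pc =>
        (PySem.List.pyRange (-4) 5 1).foldl (fun w d =>
          w.modify (pc.2, pc.1 + d) 0 (· + (5 - |d|))) w) w).getD (j, i) 0
      = w.getD (j, i) 0 + (l.map (fun pc =>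
          ((PySem.List.pyRange (-4) 5 1).map (fun d =>
            if ((pc.2, pc.1 + d) : Char × Int) = (j, i) then 5 - |d| else 0)).sum)).sum := by
    intro l
    induction l with
    | nil => intro w; simp
    | cons pc rest ih =>
        intro w
        simp only [List.foldl_cons, List.map_cons, List.sum_cons, ih]
        rw [pv_getD_foldl_modify_addw (PySem.List.pyRange (-4) 5 1)
          (fun d => ((pc.2, pc.1 + d) : Char × Int)) (fun d => 5 - |d|) (j, i) w]
        ring
  unfold pvBuildWeight
  rw [hbuild, PySem.Dict.getD_empty, zero_add]
  -- each enumerate element contributes exactly its pvH weight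
  have hmem : ∀ pc ∈ PySem.List.enumerate s 0,
      ((PySem.List.pyRange (-4) 5 1).map (fun d =>
        if ((pc.2, pc.1 + d) : Char × Int) = (j, i) then 5 - |d| else 0)).sum
      = pvH s i j pc.1 := by
    intro pc hpc
    rcases (PySem.List.mem_enumerate_iff _ _ _).mp hpc with ⟨k, hk, hpceq⟩
    have hp1 : pc.1 = (k : Int) := by rw [hpceq]; simp
    have hp2 : pc.2 = s[k] := by rw [hpceq]
    by_cases hj : pc.2 = j
    · have hmapeq : (PySem.List.pyRange (-4) 5 1).map (fun d =>
          if ((pc.2, pc.1 + d) : Char × Int) = (j, i) then 5 - |d| else 0)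
          = (PySem.List.pyRange (-4) 5 1).map (fun d =>
          if pc.1 + d = i then 5 - |d| else 0) := by
        refine List.map_congr_left (fun d _ => ?_)
        simp [Prod.ext_iff, hj]
      rw [hmapeq, pv_sum_indicator _ (PySem.List.nodup_pyRange_one _ _)]
      have hget : PySem.List.pyGetD s pc.1 ' ' = j := by
        rw [hp1, PySem.List.pyGetD_natCast, List.getD_eq_getElem s ' ' hk, ← hp2]
        exact hj
      unfold pvH
      simp only [PySem.List.mem_pyRange_one]
      split_ifs with h1 h2 h2
      · rw [abs_sub_comm]
      · exact absurd ⟨by omega, by omega, hget, by omega, by omega⟩ h2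
      · exact absurd ⟨by omega, by omega⟩ h1
      · rfl
    · have hmapeq : (PySem.List.pyRange (-4) 5 1).map (fun d =>
          if ((pc.2, pc.1 + d) : Char × Int) = (j, i) then 5 - |d| else 0)
          = (PySem.List.pyRange (-4) 5 1).map (fun _ => (0 : Int)) := by
        refine List.map_congr_left (fun d _ => ?_)
        rw [if_neg (fun hc => hj (congrArg Prod.fst hc))]
      rw [hmapeq]
      have hz : pvH s i j pc.1 = 0 := by
        unfold pvH; rw [if_neg]
        rintro ⟨-, -, hg, -, -⟩
        rw [hp1, PySem.List.pyGetD_natCast, List.getD_eq_getElem s ' ' hk] at hg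
        exact hj (hp2 ▸ hg)
      rw [hz]
      simp
  rw [List.map_congr_left hmem, pv_window_eq_range]
  have hmap2 : (PySem.List.enumerate s 0).map (fun pc => pvH s i j pc.1)
      = ((PySem.List.enumerate s 0).map (·.1)).map (pvH s i j) := by
    rw [List.map_map]; rfl
  rw [hmap2, PySem.List.map_fst_enumerate]
  simp only [zero_add]

-- A's ranking of a phrase equals B's table-lookup ranking
lemma pv_rank_eq (text phrase : String) :
    searchRank text phrase = (PySem.List.enumerate phrase.toList 0).foldl
      (fun rank ich => rank + (pvBuildWeight text).getD (ich.2, ich.1) 0) 0 := by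
  unfold searchRank
  have eA : (fun (rank : Int) (ij : Int × Char) =>
      (PySem.List.pyRange (-4) 5 1).foldl (fun rank b =>
        if 0 ≤ ij.1 + b ∧ ij.1 + b < (text.toList.length : Int) then
          if PySem.List.pyGetD text.toList (ij.1 + b) ' ' = ij.2 then
            rank + (5 - |ij.1 - (ij.1 + b)|)
          else rank
        else rank) rank)
      = fun rank ij => rank + ((PySem.List.pyRange (-4) 5 1).map (pvGA text.toList ij.1 ij.2)).sum := by
    funext rank ij
    rw [show (fun (rank : Int) (b : Int) =>
        if 0 ≤ ij.1 + b ∧ ij.1 + b < (text.toList.length : Int) then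
          if PySem.List.pyGetD text.toList (ij.1 + b) ' ' = ij.2 then
            rank + (5 - |ij.1 - (ij.1 + b)|)
          else rank
        else rank) = fun rank b => rank + pvGA text.toList ij.1 ij.2 b from by
      funext rank b
      unfold pvGA
      split_ifs with h1 h2 h3 h3 <;> first | rfl | omega | (exact absurd ⟨h1.1, h1.2, h2⟩ h3) | (exact absurd ⟨h3.1, h3.2.1⟩ h1) | (exact absurd h3.2.2 h2)]
    rw [PySem.List.foldl_add]
  rw [eA]
  rw [show (fun (rank : Int) (ich : Int × Char) =>
      rank + (pvBuildWeight text).getD (ich.2, ich.1) 0)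
      = fun rank ij => rank + ((PySem.List.pyRange (-4) 5 1).map (pvGA text.toList ij.1 ij.2)).sum from by
    funext rank ich
    rw [pv_weight_getD]]

-- ===== VERDICT (by name: the statement is the Claim_ definition above) =====
theorem calcBestPhrase_spec : Claim_equal_calcBestPhrase := by
  intro text wList _
  unfold Spec_calcBestPhrase calcBestPhrase calcBestPhrase_alt
  rw [show (fun (st : String × Int) (p : Int × String) =>
      let newRank := searchRank text p.2
      if newRank > st.2 then (p.2, newRank) else st)
      = fun st p => (fun (st : String × Int) (phrase : String) =>
          let rank := (PySem.List.enumerate phrase.toList 0).foldl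
            (fun rank ich => rank + (pvBuildWeight text).getD (ich.2, ich.1) 0) 0
          if rank > st.2 then (phrase, rank) else st) st p.2 from by
    funext st p
    simp only [pv_rank_eq]]
  have hG := List.foldl_map (f := fun (p : Int × String) => p.2)
    (g := fun (st : String × Int) (phrase : String) =>
      let rank := (PySem.List.enumerate phrase.toList 0).foldl
        (fun rank ich => rank + (pvBuildWeight text).getD (ich.2, ich.1) 0) 0
      if rank > st.2 then (phrase, rank) else st)
    (l := PySem.List.enumerate wList 0) (init := (("" : String), (0 : Int)))
  rw [PySem.List.map_snd_enumerate] at hG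
  exact congrArg Prod.fst hG.symm
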